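-- pv_equiv track=rewrite | github.com/mohammadJaliliTorkamani/CASEY-Tool | noise_dead_code.py | _insert_ruby
-- ===== SOURCE A (Python) =====
-- def _insert_ruby(code):
--     noise = "\n    if false then puts 0 end"
--     code_lines = code.split("\n")
--     for i, line in enumerate(code_lines):
--         if line.strip().startswith("def "):
--             code_lines.insert(i + 1, noise)
--             break
--     return "\n".join(code_lines)
-- ===== SOURCE B (Python) =====
-- def _insert_ruby(code):
--     noise = "\n    if false then puts 0 end"
--     done = []
--     rest = code
--     while True:
--         line, sep, after = rest.partition("\n")
--         if line.strip().startswith("def "):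
--             return "".join(done) + line + "\n" + noise + sep + after
--         if not sep:
--             return code
--         done.append(line + sep)
--         rest = after
-- ===== Notes on version B (the rewrite author's own statement) =====
-- stated objective: alternative
-- what changed: B drops A's split-into-a-list-of-lines / list.insert / newline-join pipeline and instead scans the raw string once with str.partition, splicing the noise in by plain string concatenation (or returning the original string if no def line exists).
import Mathlib
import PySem

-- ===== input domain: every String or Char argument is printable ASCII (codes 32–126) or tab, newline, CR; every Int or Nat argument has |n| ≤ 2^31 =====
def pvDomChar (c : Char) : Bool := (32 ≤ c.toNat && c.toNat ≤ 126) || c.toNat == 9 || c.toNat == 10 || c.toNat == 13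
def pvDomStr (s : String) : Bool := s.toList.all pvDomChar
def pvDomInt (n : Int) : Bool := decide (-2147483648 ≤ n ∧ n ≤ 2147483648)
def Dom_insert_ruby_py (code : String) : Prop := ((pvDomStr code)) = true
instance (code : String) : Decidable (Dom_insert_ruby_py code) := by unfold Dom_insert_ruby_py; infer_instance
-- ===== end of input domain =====

-- B replaces A's split-into-a-list-of-lines / list.insert / join pipeline by a single
-- left-to-right scan of the raw string (str.partition) that splices the noise in by string
-- concatenation (objective: alternative, same cost).

-- the line test both Pythons share verbatim: line.strip().startswith("def ")
def pvIsDef (l : List Char) : Bool :=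
  PySem.Chars.startswith (PySem.Chars.strip l) "def ".toList

def pvNoise : List Char := "\n    if false then puts 0 end".toList

-- ===== PORT A =====
-- the for-loop over enumerate(code_lines) with insert(i+1, noise) and break:
-- insert the noise line after the first matching line, leave the rest untouched
def pvInsertLoop : List (List Char) → List (List Char)
  | [] => []
  | l :: ls => if pvIsDef l then l :: pvNoise :: ls else l :: pvInsertLoop ls

def insert_ruby_py (code : String) : String :=
  String.mk (PySem.Chars.join ['\n'] (pvInsertLoop (PySem.Chars.splitOn code.toList ['\n'])))

-- ===== PORT B =====
-- rest.partition("\n") is ported by hand as (takeWhile, dropWhile) — exact for the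
-- single-character separator "\n": dropWhile carries sep ++ after.
-- done is B's "".join(done) accumulator kept flat.
def pvAltGo (done rest code : List Char) : List Char :=
  if pvIsDef (rest.takeWhile (· != '\n')) then
    done ++ rest.takeWhile (· != '\n') ++ '\n' :: pvNoise ++ rest.dropWhile (· != '\n')
  else
    match h : rest.dropWhile (· != '\n') with
    | [] => code
    | _ :: after => pvAltGo (done ++ rest.takeWhile (· != '\n') ++ ['\n']) after code
termination_by rest.length
decreasing_by
  have hle := List.length_dropWhile_le (fun c => c != '\n') rest
  rw [h] at hle
  simp at hle
  omega

def insert_ruby_py_alt (code : String) : String :=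
  String.mk (pvAltGo [] code.toList code.toList)

-- ===== PRECONDITION & SPEC =====
def Spec_insert_ruby_py (code : String) (out : String) : Prop := out = insert_ruby_py_alt code
instance (code : String) (out : String) : Decidable (Spec_insert_ruby_py code out) := by unfold Spec_insert_ruby_py; infer_instance

-- ===== CLAIM (what is proved, stated in full; the proofs are below) =====
def Claim_equal_insert_ruby_py : Prop := ∀ (code : String), Dom_insert_ruby_py code → Spec_insert_ruby_py code (insert_ruby_py code)

-- ===== LEMMAS AND PROOFS =====

-- reference line splitter: split on '\n'
def pvSplit : List Char → List (List Char)
  | [] => [[]]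
  | c :: rest =>
    if c = '\n' then [] :: pvSplit rest
    else (c :: (pvSplit rest).headI) :: (pvSplit rest).tail

theorem pvSplit_ne_nil (cs : List Char) : pvSplit cs ≠ [] := by
  cases cs <;> simp [pvSplit] <;> split <;> simp

theorem splitOn_go_eq (l : List Char) : ∀ (fuel : Nat) (cur : List Char) (acc : List (List Char)),
    l.length ≤ fuel →
    PySem.Chars.splitOn.go ['\n'] fuel l cur acc
      = acc.reverse ++ (cur.reverse ++ (pvSplit l).headI) :: (pvSplit l).tail := by
  induction l with
  | nil =>
    intro fuel cur acc _
    cases fuel <;> simp [PySem.Chars.splitOn.go, pvSplit]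
  | cons c rest ih =>
    intro fuel cur acc hfuel
    cases fuel with
    | zero => simp at hfuel
    | succ fuel =>
      by_cases hc : c = '\n'
      · subst hc
        have hpre : List.isPrefixOf ['\n'] ('\n' :: rest) = true := by
          simp [List.isPrefixOf]
        rw [PySem.Chars.splitOn.go, if_pos hpre]
        simp only [List.length_singleton, List.drop_succ_cons, List.drop_zero]
        simp only [List.length_cons] at hfuel
        rw [ih fuel [] (cur.reverse :: acc) (by omega)]
        have hne := pvSplit_ne_nil rest
        obtain ⟨q, tl, hq⟩ := List.exists_cons_of_ne_nil hne
        simp [pvSplit, hq]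
      · have hpre : List.isPrefixOf ['\n'] (c :: rest) = false := by
          simp [List.isPrefixOf]
          intro h; exact absurd h.symm hc
        rw [PySem.Chars.splitOn.go, if_neg (by simp [hpre])]
        simp only [List.length_cons] at hfuel
        rw [ih fuel (c :: cur) acc (by omega)]
        simp [pvSplit, hc]

theorem splitOn_eq (cs : List Char) :
    PySem.Chars.splitOn cs ['\n'] = pvSplit cs := by
  rw [PySem.Chars.splitOn, splitOn_go_eq cs (cs.length + 1) [] [] (by omega)]
  obtain ⟨q, tl, hq⟩ := List.exists_cons_of_ne_nil (pvSplit_ne_nil cs)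
  simp [hq]

-- pvSplit characterized by takeWhile / dropWhile
theorem pvSplit_of_dropWhile_nil (cs : List Char) (h : cs.dropWhile (· != '\n') = []) :
    pvSplit cs = [cs] := by
  induction cs with
  | nil => simp [pvSplit]
  | cons c rest ih =>
    by_cases hc : c = '\n'
    · subst hc; simp [List.dropWhile] at h
    · rw [List.dropWhile_cons_of_pos (by simp [hc])] at h
      simp [pvSplit, hc, ih h]

theorem pvSplit_of_dropWhile_cons (cs : List Char) (d : Char) (rs : List Char)
    (h : cs.dropWhile (· != '\n') = d :: rs) :
    d = '\n' ∧ pvSplit cs = cs.takeWhile (· != '\n') :: pvSplit rs := by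
  induction cs with
  | nil => simp at h
  | cons c rest ih =>
    by_cases hc : c = '\n'
    · subst hc
      rw [List.dropWhile_cons_of_neg (by simp)] at h
      obtain ⟨hd, hrs⟩ := List.cons.injEq .. ▸ h
      constructor
      · exact hd.symm
      · subst hrs; simp [pvSplit, List.takeWhile_cons_of_neg]
    · rw [List.dropWhile_cons_of_pos (by simp [hc])] at h
      obtain ⟨hd, hrec⟩ := ih h
      refine ⟨hd, ?_⟩
      rw [List.takeWhile_cons_of_pos (by simp [hc])]
      obtain ⟨q, tl, hq⟩ := List.exists_cons_of_ne_nil (pvSplit_ne_nil rest)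
      simp [pvSplit, hc, hrec]

-- joining the split back recovers the string
theorem join_cons_head (c : Char) (h : List Char) (tl : List (List Char)) :
    PySem.Chars.join ['\n'] ((c :: h) :: tl) = c :: PySem.Chars.join ['\n'] (h :: tl) := by
  cases tl with
  | nil => simp [PySem.Chars.join_singleton]
  | cons q tl' => rw [PySem.Chars.join_cons_cons, PySem.Chars.join_cons_cons]; simp

theorem join_pvSplit (t : List Char) :
    PySem.Chars.join ['\n'] (pvSplit t) = t := by
  induction t with
  | nil => simp [pvSplit, PySem.Chars.join_singleton]
  | cons c rest ih =>
    by_cases hc : c = '\n'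
    · subst hc
      obtain ⟨q, tl, hq⟩ := List.exists_cons_of_ne_nil (pvSplit_ne_nil rest)
      rw [show pvSplit ('\n' :: rest) = [] :: pvSplit rest from by simp [pvSplit]]
      rw [hq, PySem.Chars.join_cons_cons, ← hq, ih]
      simp
    · obtain ⟨q, tl, hq⟩ := List.exists_cons_of_ne_nil (pvSplit_ne_nil rest)
      simp only [pvSplit, if_neg hc]
      rw [hq]
      simp only [List.headI, List.tail]
      rw [join_cons_head, ← hq, ih]

theorem pvInsertLoop_ne_nil (L : List (List Char)) (h : L ≠ []) : pvInsertLoop L ≠ [] := by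
  cases L with
  | nil => exact absurd rfl h
  | cons l ls => simp [pvInsertLoop]; split <;> simp

theorem pvInsertLoop_id (L : List (List Char)) (h : L.any pvIsDef = false) :
    pvInsertLoop L = L := by
  induction L with
  | nil => rfl
  | cons l ls ih =>
    simp at h
    simp [pvInsertLoop, h.1, ih (by simp only [List.any_eq_false]; intro x hx; simp [h.2 x hx])]

theorem takeWhile_of_dropWhile_nil (cs : List Char) (h : cs.dropWhile (· != '\n') = []) :
    cs.takeWhile (· != '\n') = cs := by
  have := List.takeWhile_append_dropWhile (p := (· != '\n')) (l := cs)
  rw [h] at this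
  simpa using this

-- the main invariant of B's loop
theorem pvAltGo_eq (done rest code : List Char) :
    pvAltGo done rest code =
      if (pvSplit rest).any pvIsDef then
        done ++ PySem.Chars.join ['\n'] (pvInsertLoop (pvSplit rest))
      else code := by
  induction done, rest using pvAltGo.induct with
  | case1 done rest hdef =>
    rw [pvAltGo, if_pos hdef]
    cases hdw : rest.dropWhile (· != '\n') with
    | nil =>
      have htw := takeWhile_of_dropWhile_nil rest hdw
      rw [pvSplit_of_dropWhile_nil rest hdw]
      rw [htw] at hdef
      simp only [List.any_cons, List.any_nil, hdef, Bool.true_or, if_pos]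
      simp [pvInsertLoop, hdef, PySem.Chars.join_cons_cons, PySem.Chars.join_singleton,
        pvNoise, htw, hdw]
    | cons d rs =>
      obtain ⟨hd, hsp⟩ := pvSplit_of_dropWhile_cons rest d rs hdw
      subst hd
      rw [hsp]
      simp only [List.any_cons, hdef, Bool.true_or, if_pos]
      obtain ⟨q, tl, hq⟩ := List.exists_cons_of_ne_nil (pvSplit_ne_nil rs)
      simp only [pvInsertLoop, hdef, if_pos]
      rw [hq, PySem.Chars.join_cons_cons, PySem.Chars.join_cons_cons, ← hq, join_pvSplit]
      simp
  | case2 done rest hdef hdw =>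
    rw [pvAltGo, if_neg (by simp [hdef])]
    have htw := takeWhile_of_dropWhile_nil rest hdw
    rw [pvSplit_of_dropWhile_nil rest hdw]
    rw [htw] at hdef
    split
    · simp [hdef]
    · next _ _ heq => rw [hdw] at heq; cases heq
  | case3 done rest hdef d rs hdw ih =>
    rw [pvAltGo, if_neg (by simp [hdef])]
    obtain ⟨hd, hsp⟩ := pvSplit_of_dropWhile_cons rest d rs hdw
    subst hd
    split
    · next heq => rw [hdw] at heq; cases heq
    next _ after heq =>
    rw [hdw] at heq
    obtain ⟨-, hafter⟩ := List.cons.injEq .. ▸ heq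
    subst hafter
    rw [ih, hsp]
    simp only [List.any_cons, hdef, Bool.false_or]
    by_cases hany : (pvSplit rs).any pvIsDef
    · rw [if_pos hany, if_pos hany]
      simp only [pvInsertLoop, hdef, if_neg, Bool.false_eq_true, not_false_eq_true]
      obtain ⟨q, tl, hq⟩ :=
        List.exists_cons_of_ne_nil (pvInsertLoop_ne_nil _ (pvSplit_ne_nil rs))
      rw [hq, PySem.Chars.join_cons_cons, ← hq]
      simp
    · rw [if_neg hany, if_neg hany]

-- ===== VERDICT (by name: the statement is the Claim_ definition above) =====
theorem insert_ruby_py_spec : Claim_equal_insert_ruby_py := by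
  intro code _
  unfold Spec_insert_ruby_py insert_ruby_py insert_ruby_py_alt
  rw [splitOn_eq, pvAltGo_eq]
  by_cases hany : (pvSplit code.toList).any pvIsDef
  · rw [if_pos hany]; simp
  · rw [if_neg hany, pvInsertLoop_id _ (by simpa using hany), join_pvSplit]
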